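-- pv_equiv track=rewrite | github.com/billyhyunjun/sparta | 백준 문제/모의고사.py | solution
-- ===== SOURCE A (Python) =====
-- def solution(answers):
--     # 못난 학생 받아라
--     user1 = [1, 2, 3, 4, 5]
--     user2 = [2, 1, 2, 3, 2, 4, 2, 5]
--     user3 = [3, 3, 1, 1, 2, 2, 4, 4, 5, 5]
--     # 정답 맞춘 못난이1,2,3 정답 갯수
--     point = [0, 0, 0]
--
--     # 문제 총 갯수에 맞추어 반복하기
--     for i in range(len(answers)):
--         # 1번 못난이 맞춘 정답
--         if answers[i] == user1[i%len(user1)]: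
--             point[0] += 1
--         # 2번 못난이 맞춘 정답
--         if answers[i] == user2[i%len(user2)]:
--             point[1] += 1
--         # 3번 못난이 맞춘 정답
--         if answers[i] == user3[i%len(user3)]:
--             point[2] += 1
--
--     # 정답 순위 1위 받습니다. 공동 1등도 받습니다.
--     answer = []
--     # 정답자 한명씩 돌아서 최고 점수랑 같으면 1등 갑니다.
--     for i in range(len(point)):
--         if point[i] == max(point):
--             answer.append(i+1)  # 0,1,2번 리스트니깐 1,2,3 몬난이 해줄려면 +1하자
--     return answer
-- ===== SOURCE B (Python) =====
-- def solution(answers):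
--     patterns = ([1, 2, 3, 4, 5],
--                 [2, 1, 2, 3, 2, 4, 2, 5],
--                 [3, 3, 1, 1, 2, 2, 4, 4, 5, 5])
--     P = 40  # lcm of the pattern lengths: each student's guess depends only on i % 40
--     # one pass: histogram of answer values per position-residue class mod 40
--     freq = [{} for _ in range(P)]
--     for i, a in enumerate(answers):
--         d = freq[i % P]
--         d[a] = d.get(a, 0) + 1
--     # each score is read off the 40-bucket table, without rescanning answers
--     scores = [sum(freq[r].get(p[r % len(p)], 0) for r in range(P)) for p in patterns]
--     best = max(scores)
--     return [k + 1 for k, s in enumerate(scores) if s == best]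
-- ===== Notes on version B (the rewrite author's own statement) =====
-- stated objective: alternative
-- what changed: B replaces A's interleaved three-counter scan by a counting/bucketing algorithm: one pass builds a per-residue-mod-40 value histogram (40 = lcm of the pattern periods), then each student's score is read off the 40-bucket table without rescanning the answers, followed by the same '== max' selection.
import Mathlib
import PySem

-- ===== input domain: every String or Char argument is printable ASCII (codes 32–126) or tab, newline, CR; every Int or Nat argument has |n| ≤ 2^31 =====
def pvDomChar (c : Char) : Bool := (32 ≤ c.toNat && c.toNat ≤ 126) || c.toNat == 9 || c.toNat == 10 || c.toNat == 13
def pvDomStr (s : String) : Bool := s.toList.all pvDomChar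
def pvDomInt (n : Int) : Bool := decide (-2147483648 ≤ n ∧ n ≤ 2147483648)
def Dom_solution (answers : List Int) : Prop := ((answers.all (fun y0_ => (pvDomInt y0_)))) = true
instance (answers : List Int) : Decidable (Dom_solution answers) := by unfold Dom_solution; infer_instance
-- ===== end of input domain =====

-- B replaces A's interleaved three-counter scan by a counting/bucketing algorithm: one pass
-- builds a per-residue-mod-40 value histogram (40 = lcm of the pattern periods), then each
-- score is read off the 40-bucket table; same '== max' selection (objective: alternative).

-- ===== PORT A =====
def solution (answers : List Int) : List Int :=
  let user1 : List Int := [1, 2, 3, 4, 5]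
  let user2 : List Int := [2, 1, 2, 3, 2, 4, 2, 5]
  let user3 : List Int := [3, 3, 1, 1, 2, 2, 4, 4, 5, 5]
  let point : List Int :=
    (PySem.List.pyRange 0 answers.length 1).foldl
      (fun pt i =>
        -- indices produced by range(len(answers)) are in range, so pyGetD is exact here
        let pt := if PySem.List.pyGetD answers i 0 = PySem.List.pyGetD user1 (PySem.Int.mod i 5) 0 then pt.modify 0 (· + 1) else pt
        let pt := if PySem.List.pyGetD answers i 0 = PySem.List.pyGetD user2 (PySem.Int.mod i 8) 0 then pt.modify 1 (· + 1) else pt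
        if PySem.List.pyGetD answers i 0 = PySem.List.pyGetD user3 (PySem.Int.mod i 10) 0 then pt.modify 2 (· + 1) else pt)
      [0, 0, 0]
  let m : Int := ((PySem.List.max? point (fun y => y)).getD 0)
  (PySem.List.pyRange 0 point.length 1).foldl
    (fun ans i => if PySem.List.pyGetD point i 0 = m then ans ++ [i + 1] else ans) []

-- ===== PORT B =====
def solution_alt (answers : List Int) : List Int :=
  let patterns : List (List Int) := [[1, 2, 3, 4, 5], [2, 1, 2, 3, 2, 4, 2, 5], [3, 3, 1, 1, 2, 2, 4, 4, 5, 5]]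
  let P : Int := 40
  -- one pass: freq[i % 40] is a dict counting the answer values at positions ≡ i (mod 40)
  let freq : List (PySem.Dict Int Int) :=
    (PySem.List.enumerate answers).foldl
      (fun f ia => f.modify (PySem.Int.mod ia.1 P).toNat (fun d => d.insert ia.2 (d.getD ia.2 0 + 1)))
      (List.replicate 40 PySem.Dict.empty)
  let scores : List Int := patterns.map (fun p =>
    ((PySem.List.pyRange 0 P 1).map (fun r =>
      (PySem.List.pyGetD freq r PySem.Dict.empty).getD
        (PySem.List.pyGetD p (PySem.Int.mod r (p.length : Int)) 0) 0)).sum)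
  let best : Int := ((PySem.List.max? scores (fun y => y)).getD 0)
  (PySem.List.enumerate scores).filterMap (fun ks => if ks.2 = best then some (ks.1 + 1) else none)

-- ===== PRECONDITION & SPEC =====
def Spec_solution (answers : List Int) (out : List Int) : Prop := out = solution_alt answers
instance (answers : List Int) (out : List Int) : Decidable (Spec_solution answers out) := by unfold Spec_solution; infer_instance

-- ===== CLAIM (what is proved, stated in full; the proofs are below) =====
def Claim_equal_solution : Prop := ∀ (answers : List Int), Dom_solution answers → Spec_solution answers (solution answers)

-- ===== LEMMAS AND PROOFS =====

-- count of matches of pattern p (of declared length L) against answers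
def pvCnt (p : List Int) (L : Int) (xs : List Int) : Int :=
  (((PySem.List.enumerate xs).countP
      (fun ia => ia.2 == PySem.List.pyGetD p (PySem.Int.mod ia.1 L) 0) : Nat) : Int)

lemma pvCnt_append (p : List Int) (L : Int) (xs : List Int) (x : Int) :
    pvCnt p L (xs ++ [x]) =
      pvCnt p L xs +
        (if x = PySem.List.pyGetD p (PySem.Int.mod (xs.length : Int) L) 0 then 1 else 0) := by
  simp [pvCnt, PySem.List.enumerate_append, List.countP_append, PySem.List.enumerate_cons]

-- the interleaved fold of A computes the three per-pattern counts
lemma pvFold_eq (xs : List Int) :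
    (PySem.List.pyRange 0 xs.length 1).foldl
      (fun pt i =>
        let pt := if PySem.List.pyGetD xs i 0 = PySem.List.pyGetD [1, 2, 3, 4, 5] (PySem.Int.mod i 5) 0 then pt.modify 0 (· + 1) else pt
        let pt := if PySem.List.pyGetD xs i 0 = PySem.List.pyGetD [2, 1, 2, 3, 2, 4, 2, 5] (PySem.Int.mod i 8) 0 then pt.modify 1 (· + 1) else pt
        if PySem.List.pyGetD xs i 0 = PySem.List.pyGetD [3, 3, 1, 1, 2, 2, 4, 4, 5, 5] (PySem.Int.mod i 10) 0 then pt.modify 2 (· + 1) else pt)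
      ([0, 0, 0] : List Int)
    = [pvCnt [1, 2, 3, 4, 5] 5 xs, pvCnt [2, 1, 2, 3, 2, 4, 2, 5] 8 xs, pvCnt [3, 3, 1, 1, 2, 2, 4, 4, 5, 5] 10 xs] := by
  induction xs using List.reverseRecOn with
  | nil => simp [PySem.List.pyRange_one_eq_nil, pvCnt]
  | append_singleton xs x ih =>
    have hlen : ((xs ++ [x]).length : Int) = (xs.length : Int) + 1 := by simp
    rw [hlen, PySem.List.pyRange_one_succ_right (by positivity), List.foldl_append]
    have hcong := PySem.List.foldl_congr_mem (l := PySem.List.pyRange 0 (xs.length : Int) 1)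
      (init := ([0, 0, 0] : List Int))
      (f := fun (pt : List Int) (i : Int) =>
        let pt := if PySem.List.pyGetD (xs ++ [x]) i 0 = PySem.List.pyGetD [1, 2, 3, 4, 5] (PySem.Int.mod i 5) 0 then pt.modify 0 (· + 1) else pt
        let pt := if PySem.List.pyGetD (xs ++ [x]) i 0 = PySem.List.pyGetD [2, 1, 2, 3, 2, 4, 2, 5] (PySem.Int.mod i 8) 0 then pt.modify 1 (· + 1) else pt
        if PySem.List.pyGetD (xs ++ [x]) i 0 = PySem.List.pyGetD [3, 3, 1, 1, 2, 2, 4, 4, 5, 5] (PySem.Int.mod i 10) 0 then pt.modify 2 (· + 1) else pt)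
      (g := fun (pt : List Int) (i : Int) =>
        let pt := if PySem.List.pyGetD xs i 0 = PySem.List.pyGetD [1, 2, 3, 4, 5] (PySem.Int.mod i 5) 0 then pt.modify 0 (· + 1) else pt
        let pt := if PySem.List.pyGetD xs i 0 = PySem.List.pyGetD [2, 1, 2, 3, 2, 4, 2, 5] (PySem.Int.mod i 8) 0 then pt.modify 1 (· + 1) else pt
        if PySem.List.pyGetD xs i 0 = PySem.List.pyGetD [3, 3, 1, 1, 2, 2, 4, 4, 5, 5] (PySem.Int.mod i 10) 0 then pt.modify 2 (· + 1) else pt)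
      (by
        intro acc i hi
        rw [PySem.List.mem_pyRange_one] at hi
        have hget : PySem.List.pyGetD (xs ++ [x]) i 0 = PySem.List.pyGetD xs i 0 := by
          have h1 : i.toNat < xs.length := by omega
          rw [PySem.List.pyGetD_of_nonneg _ _ hi.1, PySem.List.pyGetD_of_nonneg _ _ hi.1,
              List.getD_append _ _ _ _ h1]
        simp only [hget])
    rw [hcong, ih]
    have hx : PySem.List.pyGetD (xs ++ [x]) (xs.length : Int) 0 = x := by
      rw [PySem.List.pyGetD_natCast]
      simp [List.getD]
    simp only [List.foldl_cons, List.foldl_nil, hx, pvCnt_append]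
    split_ifs <;> simp [List.modify]

lemma pvFM (l : List Int) (p : Int → Prop) [DecidablePred p] (f : Int → Int) :
    l.filterMap (fun x => if p x then some (f x) else none)
      = (l.filter (fun x => decide (p x))).map f := by
  induction l with
  | nil => simp
  | cons x t ih => by_cases h : p x <;> simp [h, ih]

lemma pvSelect (pts : List Int) (m : Int) :
    (PySem.List.pyRange 0 pts.length 1).foldl
      (fun ans i => if PySem.List.pyGetD pts i 0 = m then ans ++ [i + 1] else ans) []
    = (PySem.List.enumerate pts).filterMap (fun ip => if ip.2 = m then some (ip.1 + 1) else none) := by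
  rw [PySem.List.foldl_append_ite (p := fun i => PySem.List.pyGetD pts i 0 = m) (f := fun i => i + 1),
      PySem.List.enumerate_eq_map_pyRange pts 0, List.filterMap_map]
  simp only [Function.comp, List.nil_append, PySem.List.len_eq]
  exact (pvFM _ (fun x => PySem.List.pyGetD pts x 0 = m) (fun i => i + 1)).symm

-- ---- B-side characterisation: the histogram fold ----

def pvFreq (xs : List Int) : List (PySem.Dict Int Int) :=
  (PySem.List.enumerate xs).foldl
    (fun f ia => f.modify (PySem.Int.mod ia.1 40).toNat (fun d => d.insert ia.2 (d.getD ia.2 0 + 1)))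
    (List.replicate 40 PySem.Dict.empty)

-- number of positions i ≡ r (mod 40) carrying value v
def pvCnt2 (xs : List Int) (r : Nat) (v : Int) : Int :=
  (((PySem.List.enumerate xs).countP
      (fun ia => PySem.Int.mod ia.1 40 == (r : Int) && ia.2 == v) : Nat) : Int)

lemma pvFreq_append (xs : List Int) (x : Int) :
    pvFreq (xs ++ [x]) =
      (pvFreq xs).modify (xs.length % 40) (fun d => d.insert x (d.getD x 0 + 1)) := by
  have hidx : (PySem.Int.mod (xs.length : Int) 40).toNat = xs.length % 40 := by
    rw [PySem.Int.mod_eq_emod_of_pos (by norm_num : (0:Int) < 40)]; omega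
  simp only [pvFreq, PySem.List.enumerate_append, List.foldl_append, PySem.List.enumerate_cons,
             List.foldl_cons, List.foldl_nil, zero_add, hidx, PySem.List.enumerate_nil]

lemma pvFreq_length (xs : List Int) : (pvFreq xs).length = 40 := by
  induction xs using List.reverseRecOn with
  | nil => simp [pvFreq]
  | append_singleton xs x ih => simp [pvFreq_append, ih]

lemma pvCnt2_append (xs : List Int) (x : Int) (r : Nat) (v : Int) :
    pvCnt2 (xs ++ [x]) r v =
      pvCnt2 xs r v + (if xs.length % 40 = r ∧ x = v then 1 else 0) := by
  simp [pvCnt2, PySem.List.enumerate_append, List.countP_append, PySem.List.enumerate_cons]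
  split_ifs <;> push_cast <;> omega

lemma pvFreq_getD (xs : List Int) (r : Nat) (hr : r < 40) (v : Int) :
    ((pvFreq xs).getD r PySem.Dict.empty).getD v 0 = pvCnt2 xs r v := by
  induction xs using List.reverseRecOn with
  | nil =>
    rw [show pvFreq [] = List.replicate 40 PySem.Dict.empty from rfl,
        List.getD, List.getElem?_replicate]
    simp [hr, pvCnt2]
  | append_singleton xs x ih =>
    rw [pvFreq_append, pvCnt2_append]
    by_cases hb : xs.length % 40 = r
    · subst hb
      have hlt : xs.length % 40 < (pvFreq xs).length := by rw [pvFreq_length]; omega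
      have hlen : xs.length % 40 <
          ((pvFreq xs).modify (xs.length % 40) (fun d => d.insert x (d.getD x 0 + 1))).length := by
        rw [List.length_modify]; exact hlt
      rw [List.getD, List.getElem?_eq_getElem hlen, Option.getD_some, List.getElem_modify,
          if_pos rfl, PySem.Dict.getD_insert]
      have hget : (pvFreq xs)[xs.length % 40] = (pvFreq xs).getD (xs.length % 40) PySem.Dict.empty := by
        simp [List.getD, List.getElem?_eq_getElem hlt]
      rw [hget, ih]
      by_cases hv : v = x
      · subst hv
        simp
        rw [List.getD_eq_getElem?_getD] at ih
        exact ih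
      · simp [hv, Ne.symm hv]
    · rw [List.getD, List.getElem?_modify_ne _ _ hb, ← List.getD, ih]
      simp [hb]

-- summing an indicator that pins r to one residue class
lemma pvSumInd (n : Nat) (m : Nat) (c : Nat → Int)
    (hc : ∀ r, c r = if m = r then c r else 0) :
    ((List.range n).map c).sum = if m < n then c m else 0 := by
  induction n with
  | zero => simp
  | succ n ih =>
    rw [List.range_succ, List.map_append, List.sum_append, ih]
    by_cases h1 : m < n
    · have : c n = 0 := by rw [hc n]; simp; omega
      simp [this, h1]; omega
    · by_cases h2 : m = n
      · subst h2; simp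
      · have : c n = 0 := by rw [hc n]; simp [h2]
        simp [this, h1]; omega

-- partition of the match count over the 40 residue classes
lemma pvPartition (xs : List Int) (h : Int → Int) :
    ((List.range 40).map (fun r => pvCnt2 xs r (h r))).sum
      = (((PySem.List.enumerate xs).countP
            (fun ia => ia.2 == h (PySem.Int.mod ia.1 40)) : Nat) : Int) := by
  induction xs using List.reverseRecOn with
  | nil => simp [pvCnt2]
  | append_singleton xs x ih =>
    have hstep : ∀ r ∈ List.range 40,
        (fun r => pvCnt2 (xs ++ [x]) r (h r)) r
          = (fun r => pvCnt2 xs r (h r) + (if xs.length % 40 = r ∧ x = h r then 1 else 0)) r :=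
      fun r _ => pvCnt2_append xs x r (h r)
    rw [List.map_congr_left hstep, PySem.List.sum_map_add_int, ih]
    have hind : ((List.range 40).map
        (fun r => (if xs.length % 40 = r ∧ x = h r then 1 else 0 : Int))).sum
        = if x = h ((xs.length % 40 : Nat) : Int) then 1 else 0 := by
      rw [pvSumInd 40 (xs.length % 40) _ (by
        intro r
        by_cases h1 : xs.length % 40 = r
        · simp [h1]
        · simp [h1])]
      have : xs.length % 40 < 40 := by omega
      simp [this]
    rw [hind]
    have hm : PySem.Int.mod (xs.length : Int) 40 = ((xs.length % 40 : Nat) : Int) := by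
      rw [PySem.Int.mod_eq_emod_of_pos (by norm_num : (0:Int) < 40)]; omega
    simp [PySem.List.enumerate_append, List.countP_append, PySem.List.enumerate_cons]

-- B's table read for one pattern equals the direct match count
lemma pvScore (xs : List Int) (p : List Int) (hpos : 0 < (p.length : Int))
    (hdvd : (p.length : Int) ∣ 40) :
    ((PySem.List.pyRange 0 40 1).map (fun r =>
        (PySem.List.pyGetD (pvFreq xs) r PySem.Dict.empty).getD
          (PySem.List.pyGetD p (PySem.Int.mod r (p.length : Int)) 0) 0)).sum
      = pvCnt p (p.length : Int) xs := by
  have h40 : (40 : Int) = ((40 : Nat) : Int) := by norm_num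
  rw [h40, PySem.List.pyRange_zero_natCast, List.map_map]
  have hterm : ∀ r ∈ List.range 40,
      ((fun r : Int =>
          (PySem.List.pyGetD (pvFreq xs) r PySem.Dict.empty).getD
            (PySem.List.pyGetD p (PySem.Int.mod r (p.length : Int)) 0) 0) ∘ (fun k : Nat => (k : Int))) r
        = (fun r : Nat => pvCnt2 xs r
            (PySem.List.pyGetD p (PySem.Int.mod (r : Int) (p.length : Int)) 0)) r := by
    intro r hr
    rw [List.mem_range] at hr
    simp only [Function.comp]
    rw [PySem.List.pyGetD_natCast, List.getD, ← List.getD,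
        pvFreq_getD xs r hr]
  rw [List.map_congr_left hterm,
      pvPartition xs (fun t => PySem.List.pyGetD p (PySem.Int.mod t (p.length : Int)) 0)]
  have hfun : (fun ia : Int × Int =>
      ia.2 == PySem.List.pyGetD p (PySem.Int.mod (PySem.Int.mod ia.1 40) (p.length : Int)) 0)
      = (fun ia : Int × Int => ia.2 == PySem.List.pyGetD p (PySem.Int.mod ia.1 (p.length : Int)) 0) := by
    funext ia
    rw [PySem.Int.mod_eq_emod_of_pos hpos, PySem.Int.mod_eq_emod_of_pos (by norm_num : (0:Int) < 40),
        PySem.Int.mod_eq_emod_of_pos hpos, Int.emod_emod_of_dvd _ hdvd]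
  rw [pvCnt, hfun]

theorem solution_spec : Claim_equal_solution := by
  unfold Claim_equal_solution Spec_solution solution solution_alt
  intro answers _
  simp only [pvFold_eq, pvSelect]
  rw [show ((PySem.List.enumerate answers).foldl
      (fun f ia => f.modify (PySem.Int.mod ia.1 40).toNat (fun d => d.insert ia.2 (d.getD ia.2 0 + 1)))
      (List.replicate 40 PySem.Dict.empty)) = pvFreq answers from rfl]
  have hs : ([[1, 2, 3, 4, 5], [2, 1, 2, 3, 2, 4, 2, 5], [3, 3, 1, 1, 2, 2, 4, 4, 5, 5]] : List (List Int)).map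
      (fun p => ((PySem.List.pyRange 0 40 1).map (fun r =>
        (PySem.List.pyGetD (pvFreq answers) r PySem.Dict.empty).getD
          (PySem.List.pyGetD p (PySem.Int.mod r (p.length : Int)) 0) 0)).sum)
      = [pvCnt [1, 2, 3, 4, 5] 5 answers, pvCnt [2, 1, 2, 3, 2, 4, 2, 5] 8 answers,
         pvCnt [3, 3, 1, 1, 2, 2, 4, 4, 5, 5] 10 answers] := by
    simp only [List.map_cons, List.map_nil]
    rw [pvScore answers _ (by norm_num) (by norm_num),
        pvScore answers _ (by norm_num) (by norm_num),
        pvScore answers _ (by norm_num) (by norm_num)]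
    norm_num
  rw [hs]
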